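-- pv_equiv track=rewrite | github.com/FadyKamil15/ARL_workshop_mission | BFS.py | transform
-- ===== SOURCE A (Python) =====
-- def transform (start_i, start_j, path):
--     new_i = start_i
--     new_j = start_j
--     for i in range(len(path)):
--         if path[i] == 'l':
--             new_i -= 1
--         if path[i] == 'u':
--             new_j -= 1
--         if path[i] == 'd':
--             new_j += 1
--         if path[i] == 'r':
--             new_i += 1
--     return new_i, new_j
-- ===== SOURCE B (Python) =====
-- DELTAS = {'l': (-1, 0), 'r': (1, 0), 'u': (0, -1), 'd': (0, 1)}
--
-- def _offset(path):
--     # divide-and-conquer: the net offset of a path is the vector sum of the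
--     # offsets of its two halves (displacement addition is associative)
--     n = len(path)
--     if n == 0:
--         return (0, 0)
--     if n == 1:
--         return DELTAS.get(path, (0, 0))
--     m = n // 2
--     a = _offset(path[:m])
--     b = _offset(path[m:])
--     return (a[0] + b[0], a[1] + b[1])
--
-- def transform(start_i, start_j, path):
--     di, dj = _offset(path)
--     return (start_i + di, start_j + dj)
-- ===== Notes on version B (the rewrite author's own statement) =====
-- stated objective: alternative
-- what changed: Replaces A's left-to-right accumulating loop with four branch tests per character by a divide-and-conquer recursion: the path is split in half, each half's net offset vector is computed recursively (single characters via a delta table), and the two vectors are added, correct because displacement addition is associative.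
import Mathlib
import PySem

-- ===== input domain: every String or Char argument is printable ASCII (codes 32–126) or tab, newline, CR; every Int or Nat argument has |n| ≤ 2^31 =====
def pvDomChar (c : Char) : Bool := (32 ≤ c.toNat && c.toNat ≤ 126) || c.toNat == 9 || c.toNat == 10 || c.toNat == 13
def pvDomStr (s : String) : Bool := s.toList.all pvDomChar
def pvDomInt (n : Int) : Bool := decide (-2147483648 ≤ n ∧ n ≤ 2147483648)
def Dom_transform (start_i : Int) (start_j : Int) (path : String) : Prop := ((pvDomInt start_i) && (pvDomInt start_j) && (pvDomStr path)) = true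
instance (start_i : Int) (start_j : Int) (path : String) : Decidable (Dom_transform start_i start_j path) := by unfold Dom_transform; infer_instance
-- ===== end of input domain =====

-- B replaces A's left-to-right branch-accumulating loop by a divide-and-conquer recursion: split the path in half, compute each half's offset vector (single characters via a delta table), add the vectors. Alternative algorithm; not claimed faster.


-- ===== PORT A =====
def transform (start_i : Int) (start_j : Int) (path : String) : Int × Int :=
  let st := path.toList.foldl (fun (st : Int × Int) c =>
    let st := if c == 'l' then (st.1 - 1, st.2) else st
    let st := if c == 'u' then (st.1, st.2 - 1) else st
    let st := if c == 'd' then (st.1, st.2 + 1) else st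
    let st := if c == 'r' then (st.1 + 1, st.2) else st
    st) (start_i, start_j)
  st

-- ===== PORT B =====
-- DELTAS (the Python dict keyed by one-character strings; exact as Char keys)
def pvDeltas : PySem.Dict Char (Int × Int) :=
  PySem.Dict.ofList [('l', (-1, 0)), ('r', (1, 0)), ('u', (0, -1)), ('d', (0, 1))]

-- _offset: divide-and-conquer over the character list (path[:m] / path[m:] with
-- 0 ≤ m ≤ len are exactly take/drop)
def pvOffset : List Char → Int × Int
  | [] => (0, 0)
  | [c] => pvDeltas.getD c (0, 0)
  | c1 :: c2 :: t =>
    let l := c1 :: c2 :: t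
    let m := l.length / 2
    let a := pvOffset (l.take m)
    let b := pvOffset (l.drop m)
    (a.1 + b.1, a.2 + b.2)
termination_by l => l.length
decreasing_by
  all_goals simp [List.length_take]
  all_goals omega

def transform_alt (start_i : Int) (start_j : Int) (path : String) : Int × Int :=
  let d := pvOffset path.toList
  (start_i + d.1, start_j + d.2)

-- ===== PRECONDITION & SPEC =====
def Spec_transform (start_i : Int) (start_j : Int) (path : String) (out : Int × Int) : Prop := out = transform_alt start_i start_j path
instance (start_i : Int) (start_j : Int) (path : String) (out : Int × Int) : Decidable (Spec_transform start_i start_j path out) := by unfold Spec_transform; infer_instance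

-- ===== CLAIM (what is proved, stated in full; the proofs are below) =====
def Claim_equal_transform : Prop := ∀ (start_i : Int) (start_j : Int) (path : String), Dom_transform start_i start_j path → Spec_transform start_i start_j path (transform start_i start_j path)

-- ===== LEMMAS AND PROOFS =====
-- A's loop computes the character counts in closed form.
lemma transform_loop_count (l : List Char) (a b : Int) :
    l.foldl (fun (st : Int × Int) c =>
      let st := if c == 'l' then (st.1 - 1, st.2) else st
      let st := if c == 'u' then (st.1, st.2 - 1) else st
      let st := if c == 'd' then (st.1, st.2 + 1) else st
      let st := if c == 'r' then (st.1 + 1, st.2) else st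
      st) (a, b)
    = (a + (l.count 'r' : Int) - (l.count 'l' : Int),
       b + (l.count 'd' : Int) - (l.count 'u' : Int)) := by
  induction l generalizing a b with
  | nil => simp
  | cons c t ih =>
    simp only [List.foldl_cons, List.count_cons]
    by_cases hl : c = 'l' <;> by_cases hu : c = 'u' <;> by_cases hd : c = 'd' <;>
      by_cases hr : c = 'r' <;> simp_all <;> omega

-- B's divide-and-conquer offset equals the same closed form.
lemma pvOffset_count (l : List Char) :
    pvOffset l = ((l.count 'r' : Int) - (l.count 'l' : Int),
                  (l.count 'd' : Int) - (l.count 'u' : Int)) := by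
  induction l using pvOffset.induct with
  | case1 => simp [pvOffset]
  | case2 c =>
    have hmk : pvDeltas = PySem.Dict.mk
        [('l', (-1, 0)), ('r', (1, 0)), ('u', (0, -1)), ('d', (0, 1))] := by decide
    by_cases hl : c = 'l'
    · subst hl; rw [pvOffset, hmk]; decide
    by_cases hr : c = 'r'
    · subst hr; rw [pvOffset, hmk]; decide
    by_cases hu : c = 'u'
    · subst hu; rw [pvOffset, hmk]; decide
    by_cases hd : c = 'd'
    · subst hd; rw [pvOffset, hmk]; decide
    rw [pvOffset, hmk]
    simp [PySem.Dict.getD_eq_get?_getD, PySem.Dict.get?, Ne.symm hl, Ne.symm hr, Ne.symm hu, Ne.symm hd,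
      hl, hr, hu, hd]
  | case3 c1 c2 t l m ihA ihB =>
    rw [pvOffset]
    rw [show pvOffset (List.take ((c1 :: c2 :: t).length / 2) (c1 :: c2 :: t))
          = ((((c1 :: c2 :: t).take ((c1 :: c2 :: t).length / 2)).count 'r' : Int)
              - (((c1 :: c2 :: t).take ((c1 :: c2 :: t).length / 2)).count 'l' : Int),
             (((c1 :: c2 :: t).take ((c1 :: c2 :: t).length / 2)).count 'd' : Int)
              - (((c1 :: c2 :: t).take ((c1 :: c2 :: t).length / 2)).count 'u' : Int)) from ihA,
        show pvOffset (List.drop ((c1 :: c2 :: t).length / 2) (c1 :: c2 :: t))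
          = ((((c1 :: c2 :: t).drop ((c1 :: c2 :: t).length / 2)).count 'r' : Int)
              - (((c1 :: c2 :: t).drop ((c1 :: c2 :: t).length / 2)).count 'l' : Int),
             (((c1 :: c2 :: t).drop ((c1 :: c2 :: t).length / 2)).count 'd' : Int)
              - (((c1 :: c2 :: t).drop ((c1 :: c2 :: t).length / 2)).count 'u' : Int)) from ihB]
    have h := List.take_append_drop ((c1 :: c2 :: t).length / 2) (c1 :: c2 :: t)
    have hc : ∀ x : Char, ((c1 :: c2 :: t).take ((c1 :: c2 :: t).length / 2)).count x
        + ((c1 :: c2 :: t).drop ((c1 :: c2 :: t).length / 2)).count x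
        = (c1 :: c2 :: t).count x := by
      intro x
      conv_rhs => rw [← h]
      rw [List.count_append]
    have hr := hc 'r'; have hl := hc 'l'; have hd := hc 'd'; have hu := hc 'u'
    simp only [Prod.mk.injEq]
    constructor <;> omega

-- ===== VERDICT (by name: the statement is the Claim_ definition above) =====
theorem transform_spec : Claim_equal_transform := by
  intro si sj p _
  unfold Spec_transform transform transform_alt
  rw [transform_loop_count, pvOffset_count]
  simp only [Prod.mk.injEq]
  omega
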